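-- pv_equiv track=rewrite | github.com/parciffal/peaple_bot | v3/helper_functions.py | remove_text_in_parentheses
-- ===== SOURCE A (Python) =====
-- def remove_text_in_parentheses(text):
--     cleaned_text = ""
--     inside_parentheses = False
--
--     for c in text:
--         if c == "(":
--             inside_parentheses = True
--         elif c == ")":
--             inside_parentheses = False
--             continue
--
--         if not inside_parentheses:
--             cleaned_text += c
--
--     return cleaned_text
-- ===== SOURCE B (Python) =====
-- def remove_text_in_parentheses(text):
--     # Jump between delimiters with str.find and copy clean chunks wholesale,
--     # instead of A's per-character boolean state machine.
--     parts = []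
--     i = 0
--     n = len(text)
--     while i < n:
--         c = text[i]
--         if c == "(":
--             j = text.find(")", i + 1)
--             i = n if j == -1 else j + 1
--         elif c == ")":
--             i += 1
--         else:
--             j = i + 1
--             while j < n and text[j] != "(" and text[j] != ")":
--                 j += 1
--             parts.append(text[i:j])
--             i = j
--     return "".join(parts)
-- ===== Notes on version B (the rewrite author's own statement) =====
-- stated objective: alternative
-- what changed: Replaces A's per-character boolean state machine with a find-based scanner that jumps from an opening parenthesis straight past the next closing one and copies runs of ordinary characters as whole slices.
import Mathlib
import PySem

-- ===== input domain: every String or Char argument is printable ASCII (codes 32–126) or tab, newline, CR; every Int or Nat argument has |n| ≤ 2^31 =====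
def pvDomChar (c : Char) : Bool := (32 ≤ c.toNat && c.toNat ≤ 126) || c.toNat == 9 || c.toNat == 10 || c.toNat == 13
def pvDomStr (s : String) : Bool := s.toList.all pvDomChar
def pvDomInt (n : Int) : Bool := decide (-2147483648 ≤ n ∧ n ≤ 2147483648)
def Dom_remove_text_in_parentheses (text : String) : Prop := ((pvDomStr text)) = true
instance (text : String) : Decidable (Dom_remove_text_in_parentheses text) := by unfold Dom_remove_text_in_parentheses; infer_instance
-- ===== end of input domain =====

-- B replaces A's per-character boolean state machine with a find-based scanner that
-- jumps from an opening parenthesis past the next closing one and copies runs of ordinary characters as slices.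

-- ===== PORT A =====
-- state = (cleaned_text so far, inside_parentheses flag); one step per character.
def remove_text_in_parentheses (text : String) : String :=
  String.mk (text.toList.foldl
    (fun (st : List Char × Bool) c =>
      if c = '(' then (st.1, true)
      else if c = ')' then (st.1, false)            -- `continue`: flag cleared, char skipped
      else if st.2 then (st.1, st.2)
      else (st.1 ++ [c], st.2))
    ([], false)).1

-- ===== PORT B =====
-- mirrors `text.find(")", i+1)` then jumping to j+1: drop through the first ')'.
def altDropClose : List Char → List Char
  | [] => []
  | c :: rest => if c = ')' then rest else altDropClose rest

theorem altDropClose_len_le : ∀ l : List Char, (altDropClose l).length ≤ l.length := by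
  intro l; induction l with
  | nil => simp [altDropClose]
  | cons c rest ih =>
    simp only [altDropClose]
    split
    · simp
    · exact Nat.le_succ_of_le ih

def altIsPlain (c : Char) : Bool := c ≠ '(' && c ≠ ')'

-- the while loop over i: skip parenthesised stretches, copy plain chunks wholesale.
def altGo : List Char → List Char
  | [] => []
  | c :: rest =>
    if c = '(' then altGo (altDropClose rest)
    else if c = ')' then altGo rest
    else c :: rest.takeWhile altIsPlain ++ altGo (rest.dropWhile altIsPlain)
termination_by l => l.length
decreasing_by
  · exact Nat.lt_succ_of_le (altDropClose_len_le rest)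
  · exact Nat.lt_succ_self _
  · exact Nat.lt_succ_of_le (List.length_dropWhile_le _ _)

def remove_text_in_parentheses_alt (text : String) : String :=
  String.mk (altGo text.toList)

-- ===== PRECONDITION & SPEC =====
def Spec_remove_text_in_parentheses (text : String) (out : String) : Prop := out = remove_text_in_parentheses_alt text
instance (text : String) (out : String) : Decidable (Spec_remove_text_in_parentheses text out) := by unfold Spec_remove_text_in_parentheses; infer_instance

-- ===== CLAIM (what is proved, stated in full; the proofs are below) =====
def Claim_equal_remove_text_in_parentheses : Prop := ∀ (text : String), Dom_remove_text_in_parentheses text → Spec_remove_text_in_parentheses text (remove_text_in_parentheses text)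

-- ===== LEMMAS AND PROOFS =====

-- recursive characterisation of A's fold
def aGo : List Char → Bool → List Char
  | [], _ => []
  | c :: rest, inside =>
    if c = '(' then aGo rest true
    else if c = ')' then aGo rest false
    else if inside then aGo rest true
    else c :: aGo rest false

theorem foldA (l : List Char) (acc : List Char) (inside : Bool) :
    (l.foldl (fun (st : List Char × Bool) c =>
      if c = '(' then (st.1, true)
      else if c = ')' then (st.1, false)
      else if st.2 then (st.1, st.2)
      else (st.1 ++ [c], st.2)) (acc, inside)).1 = acc ++ aGo l inside := by
  induction l generalizing acc inside with
  | nil => simp [aGo]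
  | cons c rest ih =>
    simp only [List.foldl_cons, aGo]
    split_ifs <;> simp_all

theorem aGo_true (l : List Char) : aGo l true = aGo (altDropClose l) false := by
  induction l with
  | nil => rfl
  | cons c rest ih =>
    simp only [aGo, altDropClose]
    split_ifs <;> simp_all

theorem aGo_chunk (l : List Char) :
    aGo l false = l.takeWhile altIsPlain ++ aGo (l.dropWhile altIsPlain) false := by
  induction l with
  | nil => rfl
  | cons c rest ih =>
    by_cases hp : altIsPlain c = true
    · have h1 : ¬ c = '(' := by simp [altIsPlain] at hp; exact hp.1
      have h2 : ¬ c = ')' := by simp [altIsPlain] at hp; exact hp.2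
      simp only [aGo, List.takeWhile_cons, List.dropWhile_cons, hp]
      simp [h1, h2, ih]
    · simp [hp]

theorem aGo_eq_altGo : ∀ l : List Char, aGo l false = altGo l := by
  intro l
  induction l using altGo.induct
  case case1 => simp [aGo, altGo]
  case case2 rest ih =>
    rw [show aGo ('(' :: rest) false = aGo rest true from by simp [aGo],
        aGo_true, ih, show altGo ('(' :: rest) = altGo (altDropClose rest) from by simp [altGo]]
  case case3 rest _ ih =>
    rw [show aGo (')' :: rest) false = aGo rest false from by simp [aGo], ih,
        show altGo (')' :: rest) = altGo rest from by simp [altGo]]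
  case case4 c rest h1 h2 ih =>
    rw [show aGo (c :: rest) false = c :: aGo rest false from by simp [aGo, h1, h2],
        aGo_chunk rest, ih,
        show altGo (c :: rest) = c :: rest.takeWhile altIsPlain ++ altGo (rest.dropWhile altIsPlain)
          from by rw [altGo]; simp [h1, h2]]
    simp

-- ===== VERDICT (by name: the statement is the Claim_ definition above) =====
theorem remove_text_in_parentheses_spec : Claim_equal_remove_text_in_parentheses := by
  intro text _
  unfold Spec_remove_text_in_parentheses remove_text_in_parentheses remove_text_in_parentheses_alt
  rw [foldA, aGo_eq_altGo]
  rfl
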